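-- pv_equiv track=rewrite | github.com/jcason-sudo/n8n-mcp-server | mcp_usecase_suite.py | find_tool_by_keywords
-- ===== SOURCE A (Python) =====
-- from typing import Any, Dict, List, Optional, Tuple
--
-- def find_tool_by_keywords(tool_names: List[str], keywords: List[str]) -> Optional[str]:
--     lower = [t.lower() for t in tool_names]
--     for i, val in enumerate(lower):
--         if all(k in val for k in keywords):
--             return tool_names[i]
--     for i, val in enumerate(lower):
--         if any(k in val for k in keywords):
--             return tool_names[i]
--     return None
-- ===== SOURCE B (Python) =====
-- from typing import List, Optional
--
-- def find_tool_by_keywords(tool_names: List[str], keywords: List[str]) -> Optional[str]: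
--     fallback = None
--     for t in tool_names:
--         low = t.lower()
--         if all(k in low for k in keywords):
--             return t
--         if fallback is None and any(k in low for k in keywords):
--             fallback = t
--     return fallback
-- ===== Notes on version B (the rewrite author's own statement) =====
-- stated objective: simpler
-- what changed: Replaced A's lowered-copy list plus two sequential index loops by a single pass that returns the first all-keyword match on sight and records the first any-keyword match as a fallback.
import Mathlib
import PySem

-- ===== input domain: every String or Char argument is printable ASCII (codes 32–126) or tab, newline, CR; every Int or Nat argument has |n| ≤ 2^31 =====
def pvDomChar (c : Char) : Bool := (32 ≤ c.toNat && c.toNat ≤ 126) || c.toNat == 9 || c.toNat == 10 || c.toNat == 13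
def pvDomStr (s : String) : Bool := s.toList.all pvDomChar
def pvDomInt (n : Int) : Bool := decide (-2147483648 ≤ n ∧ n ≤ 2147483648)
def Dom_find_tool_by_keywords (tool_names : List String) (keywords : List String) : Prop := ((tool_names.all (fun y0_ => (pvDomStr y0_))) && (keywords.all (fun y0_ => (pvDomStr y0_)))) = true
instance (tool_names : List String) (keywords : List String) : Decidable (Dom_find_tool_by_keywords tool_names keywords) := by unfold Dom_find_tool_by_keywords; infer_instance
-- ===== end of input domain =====

-- B fuses A's lowered-copy list and two sequential scans into one pass with a recorded any-match fallback (objective: simpler).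
-- ===== PORT A =====
-- first loop of A: first (val, orig) pair whose val contains all keywords
def pvAllLoop (pairs : List (String × String)) (keywords : List String) : Option String :=
  match pairs with
  | [] => none
  | (val, orig) :: rest =>
    if keywords.all (fun k => PySem.Str.isIn k val) then some orig
    else pvAllLoop rest keywords

-- second loop of A: first (val, orig) pair whose val contains some keyword
def pvAnyLoop (pairs : List (String × String)) (keywords : List String) : Option String :=
  match pairs with
  | [] => none
  | (val, orig) :: rest =>
    if keywords.any (fun k => PySem.Str.isIn k val) then some orig
    else pvAnyLoop rest keywords

def find_tool_by_keywords (tool_names : List String) (keywords : List String) : Option String :=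
  let lower := tool_names.map PySem.Str.lower
  match pvAllLoop (lower.zip tool_names) keywords with
  | some t => some t
  | none => pvAnyLoop (lower.zip tool_names) keywords

-- ===== PORT B =====
-- single pass: return the first all-match on sight, else remember the first any-match
def pvAltLoop (ts : List String) (keywords : List String) (fallback : Option String) : Option String :=
  match ts with
  | [] => fallback
  | t :: rest =>
    let low := PySem.Str.lower t
    if keywords.all (fun k => PySem.Str.isIn k low) then some t
    else pvAltLoop rest keywords
      (if fallback.isNone && keywords.any (fun k => PySem.Str.isIn k low) then some t else fallback)

def find_tool_by_keywords_alt (tool_names : List String) (keywords : List String) : Option String :=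
  pvAltLoop tool_names keywords none

-- ===== PRECONDITION & SPEC =====
def Spec_find_tool_by_keywords (tool_names : List String) (keywords : List String) (out : Option String) : Prop := out = find_tool_by_keywords_alt tool_names keywords
instance (tool_names : List String) (keywords : List String) (out : Option String) : Decidable (Spec_find_tool_by_keywords tool_names keywords out) := by unfold Spec_find_tool_by_keywords; infer_instance

-- ===== CLAIM (what is proved, stated in full; the proofs are below) =====
def Claim_equal_find_tool_by_keywords : Prop := ∀ (tool_names : List String) (keywords : List String), Dom_find_tool_by_keywords tool_names keywords → Spec_find_tool_by_keywords tool_names keywords (find_tool_by_keywords tool_names keywords)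

-- ===== LEMMAS AND PROOFS =====

-- ===== VERDICT (by name: the statement is the Claim_ definition above) =====
-- pairs fed to A's loops are just tool_names tagged with their lowercases
theorem pv_zip_map (ts : List String) :
    (ts.map PySem.Str.lower).zip ts = ts.map (fun t => (PySem.Str.lower t, t)) := by
  induction ts with
  | nil => rfl
  | cons t rest ih => simp [ih]

-- loop invariant: B's single pass equals "all-match, else fallback, else any-match"
theorem pv_altLoop_eq (ts keywords : List String) (fb : Option String) :
    pvAltLoop ts keywords fb =
      match pvAllLoop (ts.map (fun t => (PySem.Str.lower t, t))) keywords with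
      | some t => some t
      | none =>
        match fb with
        | some x => some x
        | none => pvAnyLoop (ts.map (fun t => (PySem.Str.lower t, t))) keywords := by
  induction ts generalizing fb with
  | nil => cases fb <;> rfl
  | cons t rest ih =>
    simp only [List.map_cons, pvAltLoop, pvAllLoop, pvAnyLoop]
    by_cases hall : (keywords.all (fun k => PySem.Str.isIn k (PySem.Str.lower t))) = true
    · rw [if_pos hall, if_pos hall]
    · rw [if_neg hall, if_neg hall, ih]
      cases fb with
      | some x =>
        simp only [Option.isNone_some, Bool.false_and, Bool.false_eq_true, if_false]
      | none =>
        by_cases hany : (keywords.any (fun k => PySem.Str.isIn k (PySem.Str.lower t))) = true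
        · simp only [Option.isNone_none, Bool.true_and]
          rw [if_pos hany, if_pos hany]
        · simp only [Option.isNone_none, Bool.true_and]
          rw [if_neg hany, if_neg hany]

theorem find_tool_by_keywords_spec : Claim_equal_find_tool_by_keywords := by
  intro tool_names keywords _
  unfold Spec_find_tool_by_keywords find_tool_by_keywords find_tool_by_keywords_alt
  simp only [pv_zip_map, pv_altLoop_eq]
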